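-- pv_equiv track=rewrite | github.com/janphiliprichter/JobShopScheduling | functions.py | combinations_with_replacement
-- ===== SOURCE A (Python) =====
-- def combinations_with_replacement(iterable, r):
--     """
--     Same function as in the itertools package.
--     Only difference is, that this creates lists instead of tuples.
--     """
--     # combinations_with_replacement('ABC', 2) --> AA AB AC BB BC CC
--     pool = list(iterable)
--     n = len(pool)
--     if not n and r:
--         return
--     indices = [0] * r
--     yield list(pool[i] for i in indices)
--     while True:
--         for i in reversed(range(r)):
--             if indices[i] != n - 1:
--                 break
--         else:
--             return
--         indices[i:] = [indices[i] + 1] * (r - i)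
--         yield list(pool[i] for i in indices)
-- ===== SOURCE B (Python) =====
-- def combinations_with_replacement(iterable, r):
--     """Multiplicity decomposition: recurse over pool positions (not over r),
--     choosing how many copies k of pool[j] to take, largest k first so the
--     lexicographic order falls out; each result is [pool[j]] * k + suffix."""
--     pool = list(iterable)
--     n = len(pool)
--
--     def rec(j, rem):
--         if rem <= 0:
--             yield []
--             return
--         if j >= n:
--             return
--         for k in range(rem, -1, -1):
--             for rest in rec(j + 1, rem - k):
--                 yield [pool[j]] * k + rest
--
--     yield from rec(0, r)
-- ===== Notes on version B (the rewrite author's own statement) =====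
-- stated objective: alternative
-- what changed: Replaces the explicit index array with its reversed-scan carry/rollover successor loop by a recursive generator over start positions that prepends pool[j] to every suffix-combination.
-- outside the precondition, e.g. on combinations_with_replacement([], -1): A returns [], B returns [[]]
import Mathlib
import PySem

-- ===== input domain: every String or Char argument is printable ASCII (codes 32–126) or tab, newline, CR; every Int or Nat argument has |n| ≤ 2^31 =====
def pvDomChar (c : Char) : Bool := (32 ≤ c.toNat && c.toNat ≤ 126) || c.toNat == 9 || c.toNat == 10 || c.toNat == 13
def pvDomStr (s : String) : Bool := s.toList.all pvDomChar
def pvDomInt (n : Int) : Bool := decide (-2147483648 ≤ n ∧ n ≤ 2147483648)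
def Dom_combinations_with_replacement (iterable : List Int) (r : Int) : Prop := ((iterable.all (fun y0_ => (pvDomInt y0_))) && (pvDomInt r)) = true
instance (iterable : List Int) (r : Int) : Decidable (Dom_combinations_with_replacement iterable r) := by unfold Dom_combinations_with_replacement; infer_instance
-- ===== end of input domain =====

-- B re-implements the index-array carry loop as a recursive generator over start positions
-- (alternative decomposition, same cost); both ports compare the full list of yielded values.

-- ===== PORT A =====
-- the 'for i in reversed(range(r)): if indices[i] != n-1: break / else: return' scan
def cwrAFind : List Nat → List Int → Int → Option Nat
  | [], _, _ => none
  | i :: rest, ix, c => if ix.getD i 0 ≠ c then some i else cwrAFind rest ix c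

-- one iteration's break-test plus 'indices[i:] = [indices[i] + 1] * (r - i)'
def cwrStep (n r : Nat) (ix : List Int) : Option (List Int) :=
  match cwrAFind (List.range r).reverse ix ((n : Int) - 1) with
  | none => none
  | some i => some (ix.take i ++ List.replicate (r - i) (ix.getD i 0 + 1))

-- the 'while True' loop; fuel n^r bounds the number of index tuples, so it is never exhausted
def cwrALoop (pool : List Int) (n r : Nat) : Nat → List Int → List (List Int)
  | 0, _ => []
  | fuel + 1, ix =>
    match cwrStep n r ix with
    | none => []
    | some ix' => ix'.map (fun j => PySem.List.pyGetD pool j 0) :: cwrALoop pool n r fuel ix'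

def combinations_with_replacement (iterable : List Int) (r : Int) : List (List Int) :=
  let pool := iterable
  let n := pool.length
  if n = 0 ∧ r ≠ 0 then []
  else
    let indices : List Int := List.replicate r.toNat 0
    indices.map (fun i => PySem.List.pyGetD pool i 0) ::
      cwrALoop pool n r.toNat (n ^ r.toNat) indices

-- ===== PORT B =====
-- rec(j, rem) of Source B: choose the multiplicity k of pool[j], largest first;
-- Python's 'rem <= 0' base together with the int argument r is rendered by the Nat r.toNat
def cwrBRec (pool : List Int) (n : Nat) (j rem : Nat) : List (List Int) :=
  if rem = 0 then [[]]
  else if n ≤ j then []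
  else
    (List.range (rem + 1)).reverse.flatMap (fun k =>
      (cwrBRec pool n (j + 1) (rem - k)).map
        (fun rest => List.replicate k (PySem.List.pyGetD pool (j : Int) 0) ++ rest))
termination_by n - j
decreasing_by omega

def combinations_with_replacement_alt (iterable : List Int) (r : Int) : List (List Int) :=
  cwrBRec iterable iterable.length 0 r.toNat

-- ===== PRECONDITION & SPEC =====
-- Pre_ excludes only the empty iterable with negative r: a negative count is outside the
-- function's meaningful domain, and there A's empty yield sequence and B's single empty
-- combination are equally accidental answers.
def Pre_combinations_with_replacement (iterable : List Int) (r : Int) : Prop :=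
  ¬(iterable = [] ∧ r < 0)
instance (iterable : List Int) (r : Int) : Decidable (Pre_combinations_with_replacement iterable r) := by unfold Pre_combinations_with_replacement; infer_instance

def pvWitness_combinations_with_replacement : List Int × Int := ([1, 2], 2)

def Spec_combinations_with_replacement (iterable : List Int) (r : Int) (out : List (List Int)) : Prop := out = combinations_with_replacement_alt iterable r
instance (iterable : List Int) (r : Int) (out : List (List Int)) : Decidable (Spec_combinations_with_replacement iterable r out) := by unfold Spec_combinations_with_replacement; infer_instance

-- ===== CLAIM (what is proved, stated in full; the proofs are below) =====
def Claim_equal_combinations_with_replacement : Prop := ∀ (iterable : List Int) (r : Int), Dom_combinations_with_replacement iterable r → Pre_combinations_with_replacement iterable r → Spec_combinations_with_replacement iterable r (combinations_with_replacement iterable r)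

-- ===== LEMMAS AND PROOFS =====

-- the lexicographic enumeration of index tuples both programs walk through
def cwrEnum (n : Nat) : Nat → Nat → List (List Int)
  | 0, _ => [[]]
  | r + 1, s =>
    (List.range' s (n - s)).flatMap (fun j => (cwrEnum n r j).map (fun rest => (j : Int) :: rest))

-- A's successor relation, stated by the shape of the index tuple
def StepD (n : Nat) (a b : List Int) : Prop :=
  ∃ u d m, d ≠ (n : Int) - 1 ∧ a = u ++ d :: List.replicate m ((n : Int) - 1) ∧
    b = u ++ List.replicate (m + 1) (d + 1)

theorem cwrAFind_congr (l : List Nat) (ix ix' : List Int) (c : Int)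
    (h : ∀ k ∈ l, ix.getD k 0 = ix'.getD k 0) : cwrAFind l ix c = cwrAFind l ix' c := by
  induction l with
  | nil => rfl
  | cons i rest ih =>
    simp only [cwrAFind, h i (by simp)]
    split_ifs with hc
    · rfl
    · exact ih (fun k hk => h k (by simp [hk]))

theorem cwrAFind_all_eq (c : Int) : ∀ (r : Nat) (ix : List Int),
    (∀ k, k < r → ix.getD k 0 = c) → cwrAFind (List.range r).reverse ix c = none := by
  intro r
  induction r with
  | zero => intro ix _; rfl
  | succ r ih =>
    intro ix h
    rw [List.range_succ, List.reverse_append]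
    simp only [List.reverse_singleton, List.singleton_append, cwrAFind, h r (by omega)]
    rw [if_neg (fun hc => hc rfl)]
    exact ih ix (fun k hk => h k (by omega))

theorem cwrAFind_decomp (c : Int) : ∀ (m : Nat) (u : List Int) (d : Int), d ≠ c →
    cwrAFind (List.range (u.length + 1 + m)).reverse (u ++ d :: List.replicate m c) c
      = some u.length := by
  intro m
  induction m with
  | zero =>
    intro u d hd
    rw [List.range_succ, List.reverse_append]
    have hget : (u ++ [d]).getD u.length 0 = d := by
      rw [List.getD_append_right _ _ _ _ (le_refl _)]; simp
    simp only [List.replicate_zero, List.reverse_singleton, List.singleton_append,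
      cwrAFind, hget]
    rw [if_pos hd]
  | succ m ih =>
    intro u d hd
    have hlen : u.length + 1 + (m + 1) = (u.length + 1 + m) + 1 := by omega
    rw [hlen, List.range_succ, List.reverse_append]
    have hget : (u ++ d :: List.replicate (m + 1) c).getD (u.length + 1 + m) 0 = c := by
      rw [List.getD_append_right _ _ _ _ (by omega)]
      have h2 : u.length + 1 + m - u.length = m + 1 := by omega
      rw [h2]
      exact List.getD_replicate _ (by omega)
    simp only [List.reverse_singleton, List.singleton_append, cwrAFind, hget]
    rw [if_neg (fun hc => hc rfl)]
    rw [cwrAFind_congr _ _ (u ++ d :: List.replicate m c) c ?_, ih u d hd]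
    intro k hk
    have hk' : k < u.length + 1 + m := by
      have := List.mem_range.mp (List.mem_reverse.mp hk); omega
    rcases lt_trichotomy k u.length with h | h | h
    · rw [List.getD_append _ _ _ _ (by omega), List.getD_append _ _ _ _ (by omega)]
    · subst h
      rw [List.getD_append_right _ _ _ _ (le_refl _),
        List.getD_append_right _ _ _ _ (le_refl _)]
      simp
    · rw [List.getD_append_right _ _ _ _ (by omega), List.getD_append_right _ _ _ _ (by omega)]
      have h1 : k - u.length = (k - u.length - 1) + 1 := by omega
      rw [h1]
      simp only [List.getD_cons_succ]
      rw [List.getD_replicate _ (by omega), List.getD_replicate _ (by omega)]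

theorem cwrStep_of_stepD {n r : Nat} {a b : List Int} (h : StepD n a b)
    (hlen : a.length = r) : cwrStep n r a = some b := by
  obtain ⟨u, d, m, hd, ha, hb⟩ := h
  subst ha hb
  have hr : r = u.length + 1 + m := by simp at hlen; omega
  subst hr
  rw [cwrStep, cwrAFind_decomp _ m u d hd]
  have h1 : (u ++ d :: List.replicate m ((n : Int) - 1)).take u.length = u := by
    simp
  have h2 : (u ++ d :: List.replicate m ((n : Int) - 1)).getD u.length 0 = d := by
    rw [List.getD_append_right _ _ _ _ (le_refl _)]; simp
  simp only [h1, h2]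
  have h3 : u.length + 1 + m - u.length = m + 1 := by omega
  rw [h3]

theorem cwrStep_top (n r : Nat) : cwrStep n r (List.replicate r ((n : Int) - 1)) = none := by
  rw [cwrStep, cwrAFind_all_eq]
  intro k hk
  simp [List.getD_eq_getElem?_getD, hk]

theorem cwrEnum_unfold {n : Nat} (r s : Nat) (hs : s < n) :
    cwrEnum n (r + 1) s
      = (cwrEnum n r s).map (fun rest => (s : Int) :: rest) ++ cwrEnum n (r + 1) (s + 1) := by
  have h : n - s = (n - (s + 1)) + 1 := by omega
  rw [cwrEnum, h, List.range'_succ, List.flatMap_cons, cwrEnum]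

theorem cwrEnum_zero_of_ge {n : Nat} (r s : Nat) (hs : n ≤ s) : cwrEnum n (r + 1) s = [] := by
  rw [cwrEnum]
  have : n - s = 0 := by omega
  simp [this]

theorem cwrEnum_head {n : Nat} : ∀ (r s : Nat), s < n →
    (cwrEnum n r s).head? = some (List.replicate r (s : Int)) := by
  intro r
  induction r with
  | zero => intro s _; rfl
  | succ r ih =>
    intro s hs
    rw [cwrEnum_unfold r s hs, List.head?_append_of_ne_nil]
    · rw [List.head?_map, ih s hs]; rfl
    · simp only [ne_eq, List.map_eq_nil_iff]
      intro h
      have := ih s hs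
      rw [h] at this
      simp at this

theorem cwrEnum_ne_nil {n : Nat} (r s : Nat) (hs : s < n) : cwrEnum n r s ≠ [] := by
  intro h
  have := cwrEnum_head (n := n) r s hs
  rw [h] at this
  simp at this

theorem cwrEnum_last {n : Nat} (r : Nat) : ∀ (s : Nat), s < n →
    (cwrEnum n r s).getLast? = some (List.replicate r ((n : Int) - 1)) := by
  induction r with
  | zero =>
    intro s hs
    have hn : (1 : Nat) ≤ n := by omega
    rfl
  | succ r ih =>
    have inner : ∀ (k s : Nat), n - s = k → s < n →
        (cwrEnum n (r + 1) s).getLast? = some (List.replicate (r + 1) ((n : Int) - 1)) := by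
      intro k
      induction k with
      | zero => intro s h hs; omega
      | succ k ihk =>
        intro s h hs
        by_cases h1 : s + 1 < n
        · rw [cwrEnum_unfold r s hs,
            List.getLast?_append_of_ne_nil _ (cwrEnum_ne_nil (r + 1) (s + 1) h1)]
          exact ihk (s + 1) (by omega) h1
        · have hs1 : n ≤ s + 1 := by omega
          rw [cwrEnum_unfold r s hs, cwrEnum_zero_of_ge r (s + 1) hs1, List.append_nil,
            List.getLast?_map, ih s hs]
          have hcast : (s : Int) = (n : Int) - 1 := by omega
          simp [hcast, List.replicate_succ]
    intro s hs
    exact inner (n - s) s rfl hs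

theorem cwrEnum_len {n : Nat} : ∀ (r s : Nat), ∀ x ∈ cwrEnum n r s, x.length = r := by
  intro r
  induction r with
  | zero => intro s x hx; simp [cwrEnum] at hx; simp [hx]
  | succ r ih =>
    intro s x hx
    simp only [cwrEnum, List.mem_flatMap, List.mem_map] at hx
    obtain ⟨j, _, rest, hrest, hcons⟩ := hx
    subst hcons
    simp [ih j rest hrest]

theorem flatMap_len_le {α : Type} (B : Nat) (f : α → List (List Int)) :
    ∀ (js : List α), (∀ j ∈ js, (f j).length ≤ B) → (js.flatMap f).length ≤ js.length * B := by
  intro js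
  induction js with
  | nil => intro _; simp
  | cons j js ih =>
    intro h
    simp only [List.flatMap_cons, List.length_append, List.length_cons]
    have h1 := h j (by simp)
    have h2 := ih (fun a ha => h a (by simp [ha]))
    calc (f j).length + (js.flatMap f).length ≤ B + js.length * B := by omega
      _ = (js.length + 1) * B := by ring

theorem cwrEnum_card {n : Nat} : ∀ (r s : Nat), (cwrEnum n r s).length ≤ n ^ r := by
  intro r
  induction r with
  | zero => intro s; simp [cwrEnum]
  | succ r ih =>
    intro s
    rw [cwrEnum]
    calc ((List.range' s (n - s)).flatMap _).length
        ≤ (List.range' s (n - s)).length * n ^ r := by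
          apply flatMap_len_le
          intro j _
          rw [List.length_map]
          exact ih j
      _ ≤ n * n ^ r := by
          rw [List.length_range']
          exact Nat.mul_le_mul_right _ (by omega)
      _ = n ^ (r + 1) := by ring

theorem stepD_cons {n : Nat} {a b : List Int} (x : Int) (h : StepD n a b) :
    StepD n (x :: a) (x :: b) := by
  obtain ⟨u, d, m, hd, ha, hb⟩ := h
  exact ⟨x :: u, d, m, hd, by simp [ha], by simp [hb]⟩

theorem cwrEnum_chain {n : Nat} : ∀ (r s : Nat), s < n →
    List.IsChain (StepD n) (cwrEnum n r s) := by
  intro r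
  induction r with
  | zero => intro s hs; exact List.isChain_singleton _
  | succ r ih =>
    have inner : ∀ (k s : Nat), n - s = k → s < n →
        List.IsChain (StepD n) (cwrEnum n (r + 1) s) := by
      intro k
      induction k with
      | zero => intro s h hs; omega
      | succ k ihk =>
        intro s h hs
        rw [cwrEnum_unfold r s hs]
        apply List.IsChain.append
        · rw [List.isChain_map]
          exact (ih s hs).imp (fun a b hab => stepD_cons _ hab)
        · by_cases h1 : s + 1 < n
          · exact ihk (s + 1) (by omega) h1
          · rw [cwrEnum_zero_of_ge r (s + 1) (by omega)]
            exact List.isChain_nil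
        · intro x hx y hy
          by_cases h1 : s + 1 < n
          · rw [List.getLast?_map, cwrEnum_last r s hs] at hx
            rw [cwrEnum_head (r + 1) (s + 1) h1] at hy
            simp only [Option.mem_def, Option.some.injEq] at hx hy
            simp only [Option.map_some, Option.some.injEq] at hx
            subst hy hx
            refine ⟨[], (s : Int), r, by omega, by simp, ?_⟩
            have hc : ((s + 1 : Nat) : Int) = (s : Int) + 1 := by push_cast; ring
            simp [hc, List.replicate_succ]
          · rw [cwrEnum_zero_of_ge r (s + 1) (by omega)] at hy
            simp at hy
    intro s hs
    exact inner (n - s) s rfl hs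

theorem cwrALoop_of_chain (pool : List Int) (n r : Nat) :
    ∀ (l : List (List Int)) (ix : List Int) (fuel : Nat),
    List.IsChain (StepD n) (ix :: l) →
    (ix :: l).getLast (by simp) = List.replicate r ((n : Int) - 1) →
    (∀ x ∈ ix :: l, x.length = r) → l.length < fuel →
    cwrALoop pool n r fuel ix = l.map (List.map (fun j => PySem.List.pyGetD pool j 0)) := by
  intro l
  induction l with
  | nil =>
    intro ix fuel _ hlast _ hfuel
    obtain ⟨f, rfl⟩ : ∃ f, fuel = f + 1 := ⟨fuel - 1, by omega⟩
    simp only [List.getLast_singleton] at hlast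
    subst hlast
    simp [cwrALoop, cwrStep_top]
  | cons b l ih =>
    intro ix fuel hchain hlast hlen hfuel
    obtain ⟨f, rfl⟩ : ∃ f, fuel = f + 1 := ⟨fuel - 1, by omega⟩
    rw [List.isChain_cons] at hchain
    have hstep : cwrStep n r ix = some b :=
      cwrStep_of_stepD (hchain.1 b rfl) (hlen ix (by simp))
    simp only [cwrALoop, hstep, List.map_cons]
    congr 1
    apply ih b f hchain.2
    · have hgl := List.getLast_cons (a := ix) (h := (by simp : (b :: l) ≠ []))
      rw [← hgl]; exact hlast
    · intro x hx; exact hlen x (by simp [hx])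
    · simp at hfuel ⊢; omega

theorem cwrBRec_flat (pool : List Int) (n : Nat) (j rem : Nat) (hj : j < n) :
    (List.range (rem + 1)).reverse.flatMap (fun k =>
      (cwrBRec pool n (j + 1) (rem - k)).map
        (fun rest => List.replicate k (PySem.List.pyGetD pool (j : Int) 0) ++ rest))
    = cwrBRec pool n j rem := by
  cases rem with
  | zero =>
    rw [cwrBRec, if_pos rfl, List.range_one, List.reverse_singleton, List.flatMap_cons,
      List.flatMap_nil, cwrBRec, if_pos rfl]
    simp
  | succ rem =>
    conv_rhs => rw [cwrBRec]
    rw [if_neg (by omega), if_neg (by omega)]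

theorem cwrBRec_eq_enum (pool : List Int) (n : Nat) :
    ∀ (b j rem : Nat), n - j ≤ b →
    cwrBRec pool n j rem
      = (cwrEnum n rem j).map (List.map (fun i => PySem.List.pyGetD pool i 0)) := by
  intro b
  induction b with
  | zero =>
    intro j rem hb
    cases rem with
    | zero => rw [cwrBRec, if_pos rfl]; simp [cwrEnum]
    | succ rem =>
      rw [cwrBRec, if_neg (by omega), if_pos (by omega),
        cwrEnum_zero_of_ge rem j (by omega)]
      simp
  | succ b ihb =>
    intro j rem hb
    induction rem with
    | zero => rw [cwrBRec, if_pos rfl]; simp [cwrEnum]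
    | succ rem ihrem =>
      by_cases hj : n ≤ j
      · rw [cwrBRec, if_neg (by omega), if_pos hj, cwrEnum_zero_of_ge rem j hj]
        simp
      · have hj' : j < n := by omega
        rw [cwrBRec, if_neg (by omega), if_neg hj]
        rw [List.range_succ_eq_map, List.reverse_cons, List.flatMap_append,
          List.flatMap_cons, List.flatMap_nil, ← List.map_reverse, List.flatMap_map]
        have hG0 : (cwrBRec pool n (j + 1) (rem + 1 - 0)).map
            (fun rest => List.replicate 0 (PySem.List.pyGetD pool (j : Int) 0) ++ rest)
            = cwrBRec pool n (j + 1) (rem + 1) := by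
          simp
        rw [hG0, List.append_nil]
        have hshift : (fun k => (cwrBRec pool n (j + 1) (rem + 1 - (k + 1))).map
              (fun rest => List.replicate (k + 1) (PySem.List.pyGetD pool (j : Int) 0) ++ rest))
            = fun k => ((cwrBRec pool n (j + 1) (rem - k)).map
              (fun rest => List.replicate k (PySem.List.pyGetD pool (j : Int) 0) ++ rest)).map
              (fun rest => PySem.List.pyGetD pool (j : Int) 0 :: rest) := by
          funext k
          have h1 : rem + 1 - (k + 1) = rem - k := by omega
          rw [h1, List.map_map]
          apply List.map_congr_left
          intro rest _
          simp [List.replicate_succ]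
        have hcomp : ((List.range (rem + 1)).reverse.flatMap
              (fun k => (fun k => (cwrBRec pool n (j + 1) (rem + 1 - k)).map
                (fun rest => List.replicate k (PySem.List.pyGetD pool (j : Int) 0) ++ rest))
                (Nat.succ k)))
            = ((List.range (rem + 1)).reverse.flatMap (fun k =>
                (cwrBRec pool n (j + 1) (rem - k)).map
                  (fun rest => List.replicate k (PySem.List.pyGetD pool (j : Int) 0) ++ rest))).map
              (fun rest => PySem.List.pyGetD pool (j : Int) 0 :: rest) := by
          rw [List.map_flatMap]
          apply List.flatMap_congr
          intro k _
          exact congrFun hshift k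
        rw [hcomp, cwrBRec_flat pool n j rem hj', ihrem,
          ihb (j + 1) (rem + 1) (by omega), cwrEnum_unfold rem j hj', List.map_append,
          List.map_map, List.map_map]
        rfl

theorem cwrALoop_nil_idx (pool : List Int) (n : Nat) :
    cwrALoop pool n 0 1 [] = [] := by
  show cwrALoop pool n 0 (0 + 1) [] = []
  simp [cwrALoop, cwrStep, cwrAFind]

theorem main_eq (iterable : List Int) (r : Int)
    (hpre : Pre_combinations_with_replacement iterable r) :
    combinations_with_replacement iterable r = combinations_with_replacement_alt iterable r := by
  unfold Pre_combinations_with_replacement at hpre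
  unfold combinations_with_replacement combinations_with_replacement_alt
  by_cases hcond : iterable.length = 0 ∧ r ≠ 0
  · rw [if_pos hcond]
    have hnil : iterable = [] := List.length_eq_zero_iff.mp hcond.1
    subst hnil
    have hr : 0 ≤ r := le_of_not_gt (fun h => hpre ⟨rfl, h⟩)
    obtain ⟨m, e⟩ : ∃ m, r.toNat = m + 1 := ⟨r.toNat - 1, by
      have := hcond.2
      omega⟩
    rw [e, cwrBRec, if_neg (by omega), if_pos (by simp)]
  · rw [if_neg hcond]
    rcases e : r.toNat with _ | m
    · change (List.map (fun i => PySem.List.pyGetD iterable i 0) (List.replicate 0 (0 : Int)) ::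
          cwrALoop iterable iterable.length 0 (iterable.length ^ 0) (List.replicate 0 (0 : Int)))
          = cwrBRec iterable iterable.length 0 0
      rw [pow_zero, List.replicate_zero, cwrALoop_nil_idx, cwrBRec, if_pos rfl]
      rfl
    · have hn : 0 < iterable.length := by
        rcases Nat.eq_zero_or_pos iterable.length with h | h
        · exact absurd ⟨h, by omega⟩ hcond
        · exact h
      change (List.map (fun i => PySem.List.pyGetD iterable i 0)
            (List.replicate (m + 1) (0 : Int)) ::
          cwrALoop iterable iterable.length (m + 1) (iterable.length ^ (m + 1))
            (List.replicate (m + 1) (0 : Int)))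
          = cwrBRec iterable iterable.length 0 (m + 1)
      rw [cwrBRec_eq_enum iterable iterable.length iterable.length 0 (m + 1) (by omega)]
      have h0n : 0 < iterable.length := hn
      obtain ⟨tl, htl⟩ : ∃ tl, cwrEnum iterable.length (m + 1) 0
          = List.replicate (m + 1) (0 : Int) :: tl := by
        have hh := cwrEnum_head (n := iterable.length) (m + 1) 0 h0n
        cases hE : cwrEnum iterable.length (m + 1) 0 with
        | nil => rw [hE] at hh; simp at hh
        | cons a tl =>
          rw [hE] at hh
          simp only [List.head?_cons, Option.some.injEq, Nat.cast_zero] at hh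
          exact ⟨tl, by rw [hh]⟩
      have hchain := cwrEnum_chain (n := iterable.length) (m + 1) 0 h0n
      have hlast := cwrEnum_last (n := iterable.length) (m + 1) 0 h0n
      have hlen := cwrEnum_len (n := iterable.length) (m + 1) 0
      have hcard := cwrEnum_card (n := iterable.length) (m + 1) 0
      rw [htl] at hchain hlast hlen hcard
      rw [htl, List.map_cons]
      congr 1
      apply cwrALoop_of_chain iterable iterable.length (m + 1) tl _ _ hchain
      · have hg := List.getLast?_eq_some_getLast
          (l := List.replicate (m + 1) (0 : Int) :: tl) (by simp)
        rw [hg] at hlast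
        exact Option.some.inj hlast
      · exact hlen
      · simp only [List.length_cons] at hcard
        omega

-- ===== VERDICT (by name: the statement is the Claim_ definition above) =====
theorem combinations_with_replacement_spec : Claim_equal_combinations_with_replacement := by
  intro iterable r _ hpre
  unfold Spec_combinations_with_replacement
  exact main_eq iterable r hpre
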